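-- pv_equiv track=rewrite | github.com/jonathf/matlab2cpp | src/matlab2cpp/datatype.py | get_dim
-- ===== SOURCE A (Python) =====
-- dim0 = {"int", "float", "uword", "double", "cx_double", "size_t"}
--
-- dim1 = {"ivec", "fvec", "uvec", "vec", "cx_vec"}
--
-- dim2 = {"irowvec", "frowvec", "urowvec", "rowvec", "cx_rowvec"}
--
-- dim3 = {"imat", "fmat", "umat", "mat", "cx_mat"}
--
-- dim4 = {"icube", "fcube", "ucube", "cube", "cx_cube"}
--
-- others = {"char", "string", "TYPE", "func_lambda", "struct", "structs", "cell",
--         "wall_clock", "SPlot"}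
--
-- def get_dim(val):
--
--     while val[-1] == "*":
--         val = val[:-1]
--
--     if val in dim0:     dim = 0
--     elif val in dim1:   dim = 1
--     elif val in dim2:   dim = 2
--     elif val in dim3:   dim = 3
--     elif val in dim4:   dim = 4
--     elif val in others: dim = None
--     else:
--         raise ValueError("Datatype '%s' not recognized" % val)
--     return dim
-- ===== SOURCE B (Python) =====
-- def get_dim(val):
--     core = val
--     while core.endswith("*"):
--         core = core[:-1]
--     # regular Armadillo names are <prefix><shape>: derive dim from the shape suffix
--     for dim, suffix in ((2, "rowvec"), (1, "vec"), (3, "mat"), (4, "cube")):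
--         if core.endswith(suffix):
--             if core[:-len(suffix)] in ("", "i", "f", "u", "cx_"):
--                 return dim
--     if core in ("int", "float", "uword", "double", "cx_double", "size_t"):
--         return 0
--     if core in ("char", "string", "TYPE", "func_lambda", "struct", "structs",
--                 "cell", "wall_clock", "SPlot"):
--         return None
--     raise ValueError("Datatype '%s' not recognized" % core)
-- ===== Notes on version B (the rewrite author's own statement) =====
-- stated objective: alternative
-- what changed: B classifies the 20 regular vector/matrix/cube names by parsing the name's morphology (shape suffix rowvec/vec/mat/cube plus a valid element-type prefix) instead of looking them up in per-dimension sets; only the irregular scalar and None-valued names stay as literal tuples. Pre_ admits exactly the inputs on which A returns (outside it both raise).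
import Mathlib
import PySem

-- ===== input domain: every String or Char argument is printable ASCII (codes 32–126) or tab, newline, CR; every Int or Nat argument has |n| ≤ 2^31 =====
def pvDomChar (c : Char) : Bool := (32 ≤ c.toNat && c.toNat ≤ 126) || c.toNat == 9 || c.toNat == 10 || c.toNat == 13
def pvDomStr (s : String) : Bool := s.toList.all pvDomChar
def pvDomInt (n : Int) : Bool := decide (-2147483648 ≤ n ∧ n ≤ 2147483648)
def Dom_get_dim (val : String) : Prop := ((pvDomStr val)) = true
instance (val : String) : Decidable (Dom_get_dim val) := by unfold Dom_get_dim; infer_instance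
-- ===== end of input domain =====

-- B derives the dimension of the regular <prefix><shape> names from their suffix/prefix structure
-- instead of per-dimension membership sets (alternative decomposition); equivalence is claimed on
-- Pre_: inputs where A returns (outside Pre_ both programs raise).

-- ===== PORT A =====
-- the 'while val[-1] == "*": val = val[:-1]' loop; on empty input Python raises IndexError,
-- which Pre_ excludes, so the [] case may return anything (it returns []).
def pvStripA (l : List Char) : List Char :=
  if l.getLast? = some '*' then pvStripA l.dropLast else l
termination_by l.length
decreasing_by
  have hne : l ≠ [] := by intro e; subst e; simp_all
  have hpos : 0 < l.length := List.length_pos_iff.mpr hne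
  simp [List.length_dropLast]
  omega

def pvDim0 : List (List Char) := ["int".toList, "float".toList, "uword".toList, "double".toList, "cx_double".toList, "size_t".toList]
def pvDim1 : List (List Char) := ["ivec".toList, "fvec".toList, "uvec".toList, "vec".toList, "cx_vec".toList]
def pvDim2 : List (List Char) := ["irowvec".toList, "frowvec".toList, "urowvec".toList, "rowvec".toList, "cx_rowvec".toList]
def pvDim3 : List (List Char) := ["imat".toList, "fmat".toList, "umat".toList, "mat".toList, "cx_mat".toList]
def pvDim4 : List (List Char) := ["icube".toList, "fcube".toList, "ucube".toList, "cube".toList, "cx_cube".toList]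
def pvOthers : List (List Char) := ["char".toList, "string".toList, "TYPE".toList, "func_lambda".toList, "struct".toList, "structs".toList, "cell".toList, "wall_clock".toList, "SPlot".toList]

-- the if/elif chain; the final 'raise ValueError' branch is excluded by Pre_ (returns none here)
def pvChainA (c : List Char) : Option Int :=
  if c ∈ pvDim0 then some 0
  else if c ∈ pvDim1 then some 1
  else if c ∈ pvDim2 then some 2
  else if c ∈ pvDim3 then some 3
  else if c ∈ pvDim4 then some 4
  else if c ∈ pvOthers then none
  else none  -- ValueError (outside Pre_)

def get_dim (val : String) : Option Int :=
  pvChainA (pvStripA val.toList)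

-- ===== PORT B =====
-- B's 'while core.endswith("*")' loop (endswith is False on the empty string, so it terminates there)
def pvStripB (l : List Char) : List Char :=
  if ['*'].isSuffixOf l then pvStripB l.dropLast else l
termination_by l.length
decreasing_by
  have hne : l ≠ [] := by intro e; subst e; simp_all [List.isSuffixOf]
  have hpos : 0 < l.length := List.length_pos_iff.mpr hne
  simp [List.length_dropLast]
  omega

def pvPrefixes : List (List Char) := ["".toList, "i".toList, "f".toList, "u".toList, "cx_".toList]

-- the for-loop over (dim, suffix) pairs: first shape suffix with a valid prefix wins
def pvShapeLoop (pairs : List (Int × List Char)) (core : List Char) : Option Int :=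
  match pairs with
  | [] => none
  | (d, suf) :: rest =>
      if suf.isSuffixOf core then
        if core.take (core.length - suf.length) ∈ pvPrefixes then some d
        else pvShapeLoop rest core
      else pvShapeLoop rest core

def pvScalars : List (List Char) := ["int".toList, "float".toList, "uword".toList, "double".toList, "cx_double".toList, "size_t".toList]
def pvOthersB : List (List Char) := ["char".toList, "string".toList, "TYPE".toList, "func_lambda".toList, "struct".toList, "structs".toList, "cell".toList, "wall_clock".toList, "SPlot".toList]

-- after the loop: scalar names → 0, 'others' → None, else ValueError (excluded by Pre_)
def pvTailB (core : List Char) : Option Int :=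
  if core ∈ pvScalars then some 0
  else if core ∈ pvOthersB then none
  else none  -- ValueError (outside Pre_)

def get_dim_alt (val : String) : Option Int :=
  let core := pvStripB val.toList
  match pvShapeLoop [(2, "rowvec".toList), (1, "vec".toList), (3, "mat".toList), (4, "cube".toList)] core with
  | some d => some d
  | none => pvTailB core

-- ===== PRECONDITION & SPEC =====
-- Pre_ admits exactly the inputs on which A returns: after removing trailing stars the
-- name is one of the 35 recognized datatype names (otherwise A raises IndexError/ValueError).
def pvNames : List (List Char) :=
  ["int".toList, "float".toList, "uword".toList, "double".toList, "cx_double".toList, "size_t".toList,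
   "ivec".toList, "fvec".toList, "uvec".toList, "vec".toList, "cx_vec".toList,
   "irowvec".toList, "frowvec".toList, "urowvec".toList, "rowvec".toList, "cx_rowvec".toList,
   "imat".toList, "fmat".toList, "umat".toList, "mat".toList, "cx_mat".toList,
   "icube".toList, "fcube".toList, "ucube".toList, "cube".toList, "cx_cube".toList,
   "char".toList, "string".toList, "TYPE".toList, "func_lambda".toList, "struct".toList, "structs".toList, "cell".toList, "wall_clock".toList, "SPlot".toList]

def Pre_get_dim (val : String) : Prop :=
  (val.toList.reverse.dropWhile (fun c => c = '*')).reverse ∈ pvNames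
instance (val : String) : Decidable (Pre_get_dim val) := by unfold Pre_get_dim; infer_instance

def pvWitness_get_dim : String := "cx_mat*"

def Spec_get_dim (val : String) (out : Option Int) : Prop := out = get_dim_alt val
instance (val : String) (out : Option Int) : Decidable (Spec_get_dim val out) := by unfold Spec_get_dim; infer_instance

-- ===== CLAIM (what is proved, stated in full; the proofs are below) =====
def Claim_equal_get_dim : Prop := ∀ (val : String), Dom_get_dim val → Pre_get_dim val → Spec_get_dim val (get_dim val)

-- ===== LEMMAS AND PROOFS =====

-- both star-stripping loops compute rstrip('*') (stated on the reversed list)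
theorem pvStripA_rev (r : List Char) :
    pvStripA r.reverse = (r.dropWhile (fun c => c = '*')).reverse := by
  induction r with
  | nil => rw [pvStripA.eq_def]; simp
  | cons c r' ih =>
    rw [pvStripA.eq_def]
    by_cases hc : c = '*'
    · subst hc; simp [ih, List.dropWhile]
    · simp [hc, List.dropWhile]

theorem pvStripB_rev (r : List Char) :
    pvStripB r.reverse = (r.dropWhile (fun c => c = '*')).reverse := by
  induction r with
  | nil => rw [pvStripB.eq_def]; simp [List.isSuffixOf]
  | cons c r' ih =>
    rw [pvStripB.eq_def]
    by_cases hc : c = '*'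
    · subst hc; simp [ih, List.dropWhile, List.isSuffixOf]
    · simp [hc, List.dropWhile, List.isSuffixOf]
      intro e; exact absurd e.symm hc

theorem pvStrip_eq (l : List Char) : pvStripB l = pvStripA l := by
  have ha := pvStripA_rev l.reverse
  have hb := pvStripB_rev l.reverse
  simp only [List.reverse_reverse] at ha hb
  rw [ha, hb]

-- on every recognized name B's structural classification agrees with A's chain
set_option maxRecDepth 20000 in
theorem pvClassify_eq (c : List Char) (h : c ∈ pvNames) :
    (match pvShapeLoop [(2, "rowvec".toList), (1, "vec".toList), (3, "mat".toList), (4, "cube".toList)] c with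
     | some d => some d
     | none => pvTailB c) = pvChainA c := by
  fin_cases h <;> decide

-- ===== VERDICT (by name: the statement is the Claim_ definition above) =====
theorem get_dim_spec : Claim_equal_get_dim := by
  intro val _ hpre
  unfold Spec_get_dim get_dim get_dim_alt
  rw [pvStrip_eq]
  have h : pvStripA val.toList ∈ pvNames := by
    have := pvStripA_rev val.toList.reverse
    simp only [List.reverse_reverse] at this
    rw [this]; exact hpre
  exact (pvClassify_eq _ h).symm
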